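-- pv_equiv track=rewrite | github.com/theri6v/CodeSprintSolutions | GeekForGeek/Problem Of The Day/Longest subsequence-1.py | longestSubseq
-- ===== SOURCE A (Python) =====
-- from typing import List
--
-- def longestSubseq(n: int, a: List[int]) -> int:
--     if n == 0:
--         return 0
--
--     dp = [1] * n
--
--
--     for i in range(1, n):
--         for j in range(i):
--             if abs(a[i] - a[j]) == 1:
--                 dp[i] = max(dp[i], dp[j] + 1)
--
--
--     return max(dp)
-- ===== SOURCE B (Python) =====
-- from typing import List
--
-- def longestSubseq(n: int, a: List[int]) -> int:
--     if n == 0: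
--         return 0
--     best = {}  # value -> length of the longest valid subsequence ending in that value
--     ans = 1
--     for x in a[:n]:
--         cur = max(best.get(x - 1, 0), best.get(x + 1, 0)) + 1
--         if cur > best.get(x, 0):
--             best[x] = cur
--         if cur > ans:
--             ans = cur
--     return ans
-- ===== Notes on version B (the rewrite author's own statement) =====
-- stated objective: faster
-- what changed: Replaces the O(n^2) nested dp[i]/dp[j] scan with a single pass keeping a dict from value to the best chain length ending in that value, so each element only looks up value-1 and value+1.
-- outside the precondition, e.g. on longestSubseq(-1, []): A raises ValueError, B returns 1; on longestSubseq(3, [1, 2]): A raises IndexError, B returns 2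
import Mathlib
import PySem

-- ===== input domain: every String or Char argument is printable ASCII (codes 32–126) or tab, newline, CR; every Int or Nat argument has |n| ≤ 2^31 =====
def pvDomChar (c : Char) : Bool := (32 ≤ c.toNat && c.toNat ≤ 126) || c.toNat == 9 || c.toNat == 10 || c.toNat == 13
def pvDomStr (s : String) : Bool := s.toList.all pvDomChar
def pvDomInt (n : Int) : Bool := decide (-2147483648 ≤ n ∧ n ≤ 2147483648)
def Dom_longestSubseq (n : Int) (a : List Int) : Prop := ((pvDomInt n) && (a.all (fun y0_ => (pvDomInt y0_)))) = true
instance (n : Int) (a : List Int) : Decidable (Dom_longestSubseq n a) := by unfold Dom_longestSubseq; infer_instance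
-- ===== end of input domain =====

-- B replaces A's nested O(n^2) dp scan by one pass with a value→best-chain-length dict (measured asymptotically faster).


-- ===== PORT A =====
def longestSubseq (n : Int) (a : List Int) : Int :=
  if n = 0 then 0
  else
    let dp0 : List Int := List.replicate n.toNat 1          -- dp = [1] * n
    let dp := (PySem.List.pyRange 1 n 1).foldl (fun dp i =>
      (PySem.List.pyRange 0 i 1).foldl (fun dp j =>
        if (PySem.List.pyGetD a i 0 - PySem.List.pyGetD a j 0).natAbs = 1 then
          PySem.List.pySetD dp i
            (max (PySem.List.pyGetD dp i 0) (PySem.List.pyGetD dp j 0 + 1))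
        else dp) dp) dp0
    (PySem.List.max? dp (fun x => x)).getD 0                -- max(dp); Pre_ keeps dp nonempty

-- ===== PORT B =====
def longestSubseq_alt (n : Int) (a : List Int) : Int :=
  if n = 0 then 0
  else
    let st := (PySem.List.slice a none (some n)).foldl      -- for x in a[:n]
      (fun (st : PySem.Dict Int Int × Int) x =>
        let cur := max (st.1.getD (x - 1) 0) (st.1.getD (x + 1) 0) + 1
        let best := if st.1.getD x 0 < cur then st.1.insert x cur else st.1
        let ans := if st.2 < cur then cur else st.2
        (best, ans))
      (PySem.Dict.empty, 1)
    st.2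

-- ===== PRECONDITION & SPEC =====
-- Exactly the inputs on which A returns: A raises ValueError (max of the empty dp) for n < 0
-- and IndexError (a[i]) for n > max(1, len(a)).
def Pre_longestSubseq (n : Int) (a : List Int) : Prop :=
  0 ≤ n ∧ (n ≤ 1 ∨ n ≤ a.length)
instance (n : Int) (a : List Int) : Decidable (Pre_longestSubseq n a) := by
  unfold Pre_longestSubseq; infer_instance

def pvWitness_longestSubseq : Int × List Int := (6, [3, 10, 4, 5, 11, 4])

def Spec_longestSubseq (n : Int) (a : List Int) (out : Int) : Prop := out = longestSubseq_alt n a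
instance (n : Int) (a : List Int) (out : Int) : Decidable (Spec_longestSubseq n a out) := by
  unfold Spec_longestSubseq; infer_instance

-- ===== CLAIM (what is proved, stated in full; the proofs are below) =====
def Claim_equal_longestSubseq : Prop := ∀ (n : Int) (a : List Int), Dom_longestSubseq n a → Pre_longestSubseq n a → Spec_longestSubseq n a (longestSubseq n a)

-- ===== LEMMAS AND PROOFS =====

-- Reference semantics shared by both sides: `bestFor seen v` is the best dp value among the
-- processed (value, dp) pairs holding value `v`; `dpStep` is the dp value of the next element;
-- `dpPairs` processes the elements in order; `ansOf` is the running maximum (at least 1).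
def bestFor (seen : List (Int × Int)) (v : Int) : Int :=
  seen.foldl (fun m p => if p.1 = v then max m p.2 else m) 0

def dpStep (seen : List (Int × Int)) (x : Int) : Int :=
  max (bestFor seen (x - 1)) (bestFor seen (x + 1)) + 1

def dpPairs (seen : List (Int × Int)) : List Int → List (Int × Int)
  | [] => seen
  | x :: xs => dpPairs (seen ++ [(x, dpStep seen x)]) xs

def ansOf (seen : List (Int × Int)) : Int :=
  seen.foldl (fun m p => max m p.2) 1

theorem dpPairs_append_singleton (xs : List Int) : ∀ (seen : List (Int × Int)) (x : Int),
    dpPairs seen (xs ++ [x]) = dpPairs seen xs ++ [(x, dpStep (dpPairs seen xs) x)] := by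
  induction xs with
  | nil => intro seen x; simp [dpPairs]
  | cons y ys ih => intro seen x; simp [dpPairs, ih]

theorem map_fst_dpPairs (xs : List Int) : ∀ (seen : List (Int × Int)),
    (dpPairs seen xs).map Prod.fst = seen.map Prod.fst ++ xs := by
  induction xs with
  | nil => intro seen; simp [dpPairs]
  | cons y ys ih => intro seen; simp [dpPairs, ih]

theorem length_dpPairs (xs : List Int) (seen : List (Int × Int)) :
    (dpPairs seen xs).length = seen.length + xs.length := by
  have h := congrArg List.length (map_fst_dpPairs xs seen)
  simpa using h

theorem dpPairs_prefix (xs : List Int) : ∀ (seen : List (Int × Int)),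
    ∃ t, dpPairs seen xs = seen ++ t := by
  induction xs with
  | nil => intro seen; exact ⟨[], by simp [dpPairs]⟩
  | cons y ys ih =>
    intro seen
    obtain ⟨t, ht⟩ := ih (seen ++ [(y, dpStep seen y)])
    exact ⟨(y, dpStep seen y) :: t, by simp [dpPairs, ht]⟩

theorem bestFor_append_singleton (seen : List (Int × Int)) (x c v : Int) :
    bestFor (seen ++ [(x, c)]) v = if x = v then max (bestFor seen v) c else bestFor seen v := by
  simp [bestFor, List.foldl_append]

theorem ansOf_append_singleton (seen : List (Int × Int)) (x c : Int) :
    ansOf (seen ++ [(x, c)]) = max (ansOf seen) c := by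
  simp [ansOf, List.foldl_append]

-- ===== B side: the dict/ans pair tracks bestFor/ansOf =====
theorem alt_fold (xs : List Int) : ∀ (seen : List (Int × Int)) (d : PySem.Dict Int Int) (ans : Int),
    (∀ v, d.getD v 0 = bestFor seen v) → ans = ansOf seen →
    (xs.foldl
      (fun (st : PySem.Dict Int Int × Int) x =>
        let cur := max (st.1.getD (x - 1) 0) (st.1.getD (x + 1) 0) + 1
        let best := if st.1.getD x 0 < cur then st.1.insert x cur else st.1
        let ans := if st.2 < cur then cur else st.2
        (best, ans))
      (d, ans)).2 = ansOf (dpPairs seen xs) := by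
  induction xs with
  | nil => intro seen d ans hd hans; simp [dpPairs, hans]
  | cons x xs ih =>
    intro seen d ans hd hans
    have hcur : max (d.getD (x - 1) 0) (d.getD (x + 1) 0) + 1 = dpStep seen x := by
      rw [hd, hd]; rfl
    simp only [List.foldl_cons, dpPairs]
    rw [ih (seen ++ [(x, dpStep seen x)])]
    · intro v
      rw [bestFor_append_singleton]
      simp only [hcur, hd x]
      by_cases hvx : x = v
      · subst hvx
        by_cases hlt : bestFor seen x < dpStep seen x
        · simp [hlt, PySem.Dict.getD_insert_self]
          omega
        · simp [hlt, hd]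
          omega
      · by_cases hlt : bestFor seen x < dpStep seen x
        · rw [if_pos hlt, PySem.Dict.getD_insert, if_neg (fun h => hvx h.symm), hd]
          simp [hvx]
        · simp only [hlt, if_false, hvx, hd]
    · rw [ansOf_append_singleton, hcur, hans]
      omega

-- ===== A side =====
-- the inner j-loop's running max equals dpStep
theorem m2_eq_dpStep (P : List (Int × Int)) (x : Int) :
    P.foldl (fun acc p => if (x - p.1).natAbs = 1 then max acc (p.2 + 1) else acc) 1 = dpStep P x := by
  induction P using List.reverseRecOn with
  | nil => simp [dpStep, bestFor]
  | append_singleton P q ih =>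
    simp only [List.foldl_append, List.foldl_cons, List.foldl_nil, ih, dpStep, bestFor]
    by_cases h1 : q.1 = x - 1
    · rw [if_pos (by omega), if_pos h1, if_neg (by omega)]
      omega
    · by_cases h2 : q.1 = x + 1
      · rw [if_pos (by omega), if_neg h1, if_pos h2]
        omega
      · rw [if_neg (by omega), if_neg h1, if_neg h2]

-- a fold over the indices of a list is a fold over the list
theorem foldl_range_getD {β γ : Type} (l : List β) (f : γ → β → γ) (d : β) :
    ∀ c, (List.range l.length).foldl (fun acc j => f acc (l.getD j d)) c = l.foldl f c := by
  induction l using List.reverseRecOn with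
  | nil => simp
  | append_singleton l b ih =>
    intro c
    simp only [List.length_append, List.length_cons, List.length_nil, List.range_succ,
      List.foldl_append, List.foldl_cons, List.foldl_nil]
    rw [PySem.List.foldl_congr_mem (List.range l.length) _ (fun acc j => f acc (l.getD j d)) c
      (by intro acc j hj; rw [List.getD_append _ _ _ _ (by simpa using List.mem_range.mp hj)]), ih]
    rw [List.getD_append_right _ _ _ _ (by omega)]
    simp

theorem getD_take_lt (l : List Int) (k j : Nat) (h : j < k) :
    (l.take k).getD j 0 = l.getD j 0 := by
  simp [List.getD_eq_getElem?_getD, List.getElem?_take_of_lt h]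

theorem getD_map_snd (P : List (Int × Int)) (j : Nat) (h : j < P.length) :
    (P.map Prod.snd).getD j 0 = (P.getD j (0, 0)).2 := by
  simp [List.getD_eq_getElem?_getD, h]

theorem getD_map_fst (P : List (Int × Int)) (j : Nat) (h : j < P.length) :
    (P.map Prod.fst).getD j 0 = (P.getD j (0, 0)).1 := by
  simp [List.getD_eq_getElem?_getD, h]

-- one pass of A's inner loop on a dp list split as V ++ dp[i] :: rest
theorem inner_loop (a : List Int) (k : Nat) :
    ∀ (j : Nat) (V R : List Int) (c : Int), V.length = k → j ≤ k →
    (PySem.List.pyRange 0 (j : Int) 1).foldl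
      (fun dp jj =>
        if (PySem.List.pyGetD a (k : Int) 0 - PySem.List.pyGetD a jj 0).natAbs = 1 then
          PySem.List.pySetD dp (k : Int)
            (max (PySem.List.pyGetD dp (k : Int) 0) (PySem.List.pyGetD dp jj 0 + 1))
        else dp)
      (V ++ c :: R)
    = V ++ ((List.range j).foldl
        (fun acc jj => if (a.getD k 0 - a.getD jj 0).natAbs = 1 then max acc (V.getD jj 0 + 1) else acc) c) :: R := by
  intro j
  induction j with
  | zero => intro V R c hV hj; simp [PySem.List.pyRange]
  | succ j ih =>
    intro V R c hV hj
    have hcast : ((j : Int) + 1) = ((j + 1 : Nat) : Int) := by push_cast; ring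
    rw [← hcast, PySem.List.pyRange_one_succ_right (by positivity), List.foldl_append,
      ih V R c hV (by omega), List.range_succ, List.foldl_append]
    simp only [List.foldl_cons, List.foldl_nil]
    set c' := (List.range j).foldl
        (fun acc jj => if (a.getD k 0 - a.getD jj 0).natAbs = 1 then max acc (V.getD jj 0 + 1) else acc) c with hc'
    have hVk : (V ++ c' :: R).getD k 0 = c' := by
      rw [List.getD_append_right _ _ _ _ (by omega)]
      simp [hV]
    have hVj : (V ++ c' :: R).getD j 0 = V.getD j 0 :=
      List.getD_append _ _ _ _ (by omega)
    have hset : ∀ v : Int, PySem.List.pySetD (V ++ c' :: R) (k : Int) v = V ++ v :: R := by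
      intro v
      rw [PySem.List.pySetD, PySem.List.pySet?_natCast _ _ _ (by simp; omega)]
      simp [hV]
    simp only [PySem.List.pyGetD_natCast, hVk, hVj, hset]
    split <;> rfl

-- the inner range-fold over indices is dpStep of the processed pairs
theorem rangefold_eq_dpStep (a : List Int) (k : Nat) (hk : k ≤ a.length) :
    (List.range k).foldl
      (fun acc jj => if (a.getD k 0 - a.getD jj 0).natAbs = 1
        then max acc (((dpPairs [] (a.take k)).map Prod.snd).getD jj 0 + 1) else acc) 1
    = dpStep (dpPairs [] (a.take k)) (a.getD k 0) := by
  set P := dpPairs [] (a.take k) with hP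
  set x := a.getD k 0 with hx
  have hlen : P.length = k := by
    rw [hP, length_dpPairs]; simp [hk]
  have hfst : P.map Prod.fst = a.take k := by
    rw [hP]; simpa using map_fst_dpPairs (a.take k) []
  rw [PySem.List.foldl_congr_mem (List.range k) _
      (fun acc jj => if (x - (P.getD jj (0, 0)).1).natAbs = 1
        then max acc ((P.getD jj (0, 0)).2 + 1) else acc) 1
      (by
        intro acc jj hjj
        have hjk : jj < P.length := by rw [hlen]; simpa using List.mem_range.mp hjj
        have h1 : a.getD jj 0 = (P.getD jj (0, 0)).1 := by
          rw [← getD_map_fst _ _ hjk, hfst]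
          exact (getD_take_lt a k jj (by omega)).symm
        rw [getD_map_snd _ _ hjk, h1]),
    ← hlen]
  exact (foldl_range_getD P
    (fun acc p => if (x - p.1).natAbs = 1 then max acc (p.2 + 1) else acc) (0, 0) 1).trans
    (m2_eq_dpStep P x)

-- A's outer loop up to index k yields the dp values of the first k elements, rest still 1
theorem outer_loop (a : List Int) (m : Nat) (hma : m ≤ a.length) :
    ∀ (k : Nat), 1 ≤ k → k ≤ m →
    (PySem.List.pyRange 1 (k : Int) 1).foldl
      (fun dp i =>
        (PySem.List.pyRange 0 i 1).foldl (fun dp j =>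
          if (PySem.List.pyGetD a i 0 - PySem.List.pyGetD a j 0).natAbs = 1 then
            PySem.List.pySetD dp i
              (max (PySem.List.pyGetD dp i 0) (PySem.List.pyGetD dp j 0 + 1))
          else dp) dp)
      (List.replicate m 1)
    = (dpPairs [] (a.take k)).map Prod.snd ++ List.replicate (m - k) 1 := by
  intro k
  induction k with
  | zero => intro h; omega
  | succ k ih =>
    intro _ hk1
    by_cases hk0 : k = 0
    · subst hk0
      have ha0 : a.take 1 = [a.getD 0 0] := by
        cases a with
        | nil => simp at hma; omega
        | cons y ys => simp
      rw [show ((1 : Nat) : Int) = 1 by norm_num, PySem.List.pyRange_one_eq_nil (by omega),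
        List.foldl_nil, ha0]
      have : dpPairs [] [a.getD 0 0] = [(a.getD 0 0, 1)] := by
        simp [dpPairs, dpStep, bestFor]
      rw [this]
      have hm1 : m = 1 + (m - 1) := by omega
      rw [hm1, List.replicate_add]
      simp
    · have hcast : ((k + 1 : Nat) : Int) = ((k : Int) + 1) := by push_cast; ring
      rw [hcast, PySem.List.pyRange_one_succ_right (by exact_mod_cast Nat.one_le_iff_ne_zero.mpr hk0),
        List.foldl_append, ih (by omega) (by omega)]
      simp only [List.foldl_cons, List.foldl_nil]
      have hVlen : ((dpPairs [] (a.take k)).map Prod.snd).length = k := by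
        rw [List.length_map, length_dpPairs]; simp; omega
      have hrep : List.replicate (m - k) (1 : Int) = 1 :: List.replicate (m - (k + 1)) 1 := by
        have : m - k = (m - (k + 1)) + 1 := by omega
        rw [this, List.replicate_succ]
      rw [hrep, inner_loop a k k _ _ 1 hVlen (le_refl k), rangefold_eq_dpStep a k (by omega)]
      have htake : a.take (k + 1) = a.take k ++ [a.getD k 0] := by
        rw [List.take_add_one]
        congr 1
        rw [List.getElem?_eq_getElem (by omega), List.getD_eq_getElem?_getD,
          List.getElem?_eq_getElem (by omega)]
        simp
      rw [htake, dpPairs_append_singleton]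
      simp

-- max(dp) over the final (nonempty) dp list is ansOf
theorem max_dp_eq_ansOf (t : List (Int × Int)) (x : Int) :
    (PySem.List.max? (((x, 1) :: t).map Prod.snd) (fun y => y)).getD 0 = ansOf ((x, 1) :: t) := by
  rw [List.map_cons, PySem.List.max?_id_cons]
  simp only [Option.getD_some, ansOf, List.foldl_cons, List.foldl_map]
  simp

-- A's value on the main case: dp values of the first m elements, then their max
theorem a_side (a : List Int) (m : Nat) (hm1 : 1 ≤ m) (hma : m ≤ a.length) :
    longestSubseq (m : Int) a = ansOf (dpPairs [] (a.take m)) := by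
  have hm0 : ((m : Int)) ≠ 0 := by exact_mod_cast Nat.one_le_iff_ne_zero.mp hm1
  have houter := outer_loop a m hma m hm1 (le_refl m)
  simp only [longestSubseq, if_neg hm0, Int.toNat_natCast, houter, Nat.sub_self,
    List.replicate_zero, List.append_nil]
  cases a with
  | nil => simp at hma; omega
  | cons y ys =>
    have htake : (y :: ys).take m = y :: ys.take (m - 1) := by
      have : m = (m - 1) + 1 := by omega
      rw [this]; simp
    rw [htake]
    have h1 : dpPairs [] (y :: ys.take (m - 1)) = dpPairs [(y, 1)] (ys.take (m - 1)) := by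
      simp [dpPairs, dpStep, bestFor]
    obtain ⟨t, ht⟩ := dpPairs_prefix (ys.take (m - 1)) [(y, 1)]
    rw [h1, ht]
    exact max_dp_eq_ansOf t y

-- B's value on the main case
theorem b_side (a : List Int) (m : Nat) (hm1 : 1 ≤ m) :
    longestSubseq_alt (m : Int) a = ansOf (dpPairs [] (a.take m)) := by
  have hm0 : ((m : Int)) ≠ 0 := by exact_mod_cast Nat.one_le_iff_ne_zero.mp hm1
  simp only [longestSubseq_alt, if_neg hm0, PySem.List.slice_to_natCast]
  exact alt_fold (a.take m) [] PySem.Dict.empty 1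
    (fun v => by simp [PySem.Dict.getD_empty, bestFor]) rfl

-- ===== VERDICT (by name: the statement is the Claim_ definition above) =====
theorem longestSubseq_spec : Claim_equal_longestSubseq := by
  intro n a _ hpre
  obtain ⟨hn0, hcase⟩ := hpre
  unfold Spec_longestSubseq
  by_cases hn : n = 0
  · simp [longestSubseq, longestSubseq_alt, hn]
  · by_cases hlen : n ≤ a.length
    · have hnm : n = ((n.toNat : Nat) : Int) := (Int.toNat_of_nonneg hn0).symm
      rw [hnm, a_side a n.toNat (by omega) (by omega), b_side a n.toNat (by omega)]
    · have hn1 : n = 1 := by omega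
      have ha : a = [] := by
        cases a with
        | nil => rfl
        | cons y ys => simp at hlen; omega
      subst hn1; subst ha
      decide
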